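-- pv_equiv track=rewrite | github.com/maximilian-salomon/mdxplain | mdxplain/data_selector/managers/data_selector_manager.py | _subtract_frames
-- ===== SOURCE A (Python) =====
-- from typing import List, Union, Dict, Any, TYPE_CHECKING
--
-- def _subtract_frames(current: Dict[int, List[int]], new_frames: Dict[int, List[int]]) -> Dict[int, List[int]]:
--     """
--     Subtract frame sets per trajectory.
--     Result is always sorted with no duplicates.
--
--     Parameters
--     ----------
--     current : Dict[int, List[int]]
--         Current trajectory to frame mapping
--     new_frames : Dict[int, List[int]]
--         New trajectory to frame mapping to subtract
--
--     Returns
--     -------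
--     Dict[int, List[int]]
--         Subtraction of frame sets per trajectory
--     """
--     result = current.copy()
--
--     for traj_idx, frames in new_frames.items():
--         if traj_idx in result:
--             remaining = set(result[traj_idx]) - set(frames)
--             if remaining:
--                 result[traj_idx] = sorted(list(remaining))
--             else:
--                 # No frames left, remove trajectory
--                 del result[traj_idx]
--
--     return result
-- ===== SOURCE B (Python) =====
-- from typing import List, Dict
--
--
-- def _subtract_frames(current: Dict[int, List[int]], new_frames: Dict[int, List[int]]) -> Dict[int, List[int]]:
--     """Sort-then-merge: for shared keys, dedup-sort both frame lists and subtract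
--     them with a two-pointer linear merge instead of a hash-set difference."""
--     result = {}
--     for traj_idx, frames in current.items():
--         if traj_idx in new_frames:
--             xs = sorted(set(frames))
--             ys = sorted(set(new_frames[traj_idx]))
--             out = []
--             i = 0
--             j = 0
--             while i < len(xs):
--                 if j < len(ys) and ys[j] < xs[i]:
--                     j += 1
--                 elif j < len(ys) and ys[j] == xs[i]:
--                     i += 1
--                 else:
--                     out.append(xs[i])
--                     i += 1
--             if out:
--                 result[traj_idx] = out
--         else:
--             result[traj_idx] = frames
--     return result
-- ===== Notes on version B (the rewrite author's own statement) =====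
-- stated objective: alternative
-- what changed: B rebuilds the result by iterating current and, for shared keys, subtracts the frame lists by dedup-sorting both and running a two-pointer sorted-merge subtraction, instead of A's copy of current mutated in place via hash-set difference followed by a sort while iterating new_frames.
import Mathlib
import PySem

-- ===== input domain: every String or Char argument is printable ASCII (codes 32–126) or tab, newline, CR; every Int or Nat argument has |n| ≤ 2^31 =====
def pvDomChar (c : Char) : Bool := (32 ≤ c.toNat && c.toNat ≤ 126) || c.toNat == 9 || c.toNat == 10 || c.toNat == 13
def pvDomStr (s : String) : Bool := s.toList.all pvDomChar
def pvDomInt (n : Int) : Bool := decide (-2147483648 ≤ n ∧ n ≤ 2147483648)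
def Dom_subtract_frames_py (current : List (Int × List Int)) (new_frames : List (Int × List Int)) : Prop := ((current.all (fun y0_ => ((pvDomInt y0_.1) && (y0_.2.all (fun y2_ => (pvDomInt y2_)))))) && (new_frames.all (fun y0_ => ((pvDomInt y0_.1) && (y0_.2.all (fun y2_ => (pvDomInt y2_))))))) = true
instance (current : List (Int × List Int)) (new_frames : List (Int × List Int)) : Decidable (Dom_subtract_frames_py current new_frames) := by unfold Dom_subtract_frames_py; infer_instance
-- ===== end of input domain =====

-- B rebuilds the result by iterating current and, for shared keys, subtracts the frame lists by
-- dedup-sorting both and running a two-pointer sorted-merge subtraction, instead of A's in-place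
-- hash-set difference followed by a sort; same return value, no speed claim.

-- ===== PORT A =====
-- A: result = current.copy(); for traj_idx, frames in new_frames.items(): if traj_idx in result:
--      remaining = set(result[traj_idx]) - set(frames); if remaining: result[traj_idx] = sorted(remaining) else del result[traj_idx]
def subtract_frames_py (current : List (Int × List Int)) (new_frames : List (Int × List Int)) : List (Int × List Int) :=
  let result : PySem.Dict Int (List Int) := PySem.Dict.ofList current
  let nfd : PySem.Dict Int (List Int) := PySem.Dict.ofList new_frames
  (nfd.items.foldl (fun (result : PySem.Dict Int (List Int)) p =>
    if result.contains p.1 then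
      let remaining := PySem.Set.diff (PySem.Set.ofList (result.getD p.1 [])) (PySem.Set.ofList p.2)
      if remaining ≠ [] then
        result.insert p.1 (PySem.List.sorted remaining (fun x => x) false)
      else
        result.erase p.1
    else result) result).items

-- ===== PORT B =====
-- B's while loop over indices i into xs and j into ys becomes the obvious structural recursion
-- on the suffixes xs[i:], ys[j:]: drop the head of ys when ys[j] < xs[i], skip the head of xs
-- when they are equal, otherwise emit the head of xs.
def pvMergeSub : List Int → List Int → List Int
  | [], _ => []
  | x :: xs, [] => x :: pvMergeSub xs []
  | x :: xs, y :: ys =>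
    if y < x then pvMergeSub (x :: xs) ys
    else if y == x then pvMergeSub xs (y :: ys)
    else x :: pvMergeSub xs (y :: ys)
termination_by xs ys => xs.length + ys.length

-- B: result = {}; for traj_idx, frames in current.items(): if traj_idx in new_frames:
--      xs = sorted(set(frames)); ys = sorted(set(new_frames[traj_idx])); out = <two-pointer merge subtraction>
--      if out: result[traj_idx] = out
--    else: result[traj_idx] = frames
def subtract_frames_py_alt (current : List (Int × List Int)) (new_frames : List (Int × List Int)) : List (Int × List Int) :=
  let nfd : PySem.Dict Int (List Int) := PySem.Dict.ofList new_frames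
  ((PySem.Dict.ofList current).items.foldl (fun (result : PySem.Dict Int (List Int)) p =>
    if nfd.contains p.1 then
      let xs := PySem.List.sorted (PySem.Set.ofList p.2) (fun x => x) false
      let ys := PySem.List.sorted (PySem.Set.ofList (nfd.getD p.1 [])) (fun x => x) false
      let out := pvMergeSub xs ys
      if out ≠ [] then result.insert p.1 out else result
    else result.insert p.1 p.2) PySem.Dict.empty).items

-- ===== PRECONDITION & SPEC =====
def Spec_subtract_frames_py (current : List (Int × List Int)) (new_frames : List (Int × List Int)) (out : List (Int × List Int)) : Prop := out = subtract_frames_py_alt current new_frames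
instance (current : List (Int × List Int)) (new_frames : List (Int × List Int)) (out : List (Int × List Int)) : Decidable (Spec_subtract_frames_py current new_frames out) := by unfold Spec_subtract_frames_py; infer_instance

-- ===== CLAIM (what is proved, stated in full; the proofs are below) =====
def Claim_equal_subtract_frames_py : Prop := ∀ (current : List (Int × List Int)) (new_frames : List (Int × List Int)), Dom_subtract_frames_py current new_frames → Spec_subtract_frames_py current new_frames (subtract_frames_py current new_frames)

-- ===== LEMMAS AND PROOFS =====

-- the per-entry effect on one entry p of the (intermediate) result, as a function of the
-- new_frames dict: drop it, shrink it, or keep it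
def pvG (nfd : PySem.Dict Int (List Int)) (p : Int × List Int) : Option (Int × List Int) :=
  if nfd.contains p.1 then
    let remaining := PySem.Set.diff (PySem.Set.ofList p.2) (PySem.Set.ofList (nfd.getD p.1 []))
    if remaining ≠ [] then some (p.1, PySem.List.sorted remaining (fun x => x) false)
    else none
  else some p

theorem pvG_cons_of_ne (t : Int) (fr : List Int) (l : List (Int × List Int)) (p : Int × List Int)
    (h : p.1 ≠ t) : pvG (PySem.Dict.mk ((t, fr) :: l)) p = pvG (PySem.Dict.mk l) p := by
  have hbe : (t == p.1) = false := by simpa using Ne.symm h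
  have h1 : (PySem.Dict.mk ((t, fr) :: l)).contains p.1 = (PySem.Dict.mk l).contains p.1 := by
    simp only [PySem.Dict.contains, List.any_cons, hbe, Bool.false_or]
  have h2 : (PySem.Dict.mk ((t, fr) :: l)).getD p.1 [] = (PySem.Dict.mk l).getD p.1 [] := by
    simp only [PySem.Dict.getD, PySem.Dict.get?, List.find?_cons, hbe]
  simp only [pvG, h1, h2]

theorem pvG_cons_self (t : Int) (fr : List Int) (l : List (Int × List Int)) (v : List Int) :
    pvG (PySem.Dict.mk ((t, fr) :: l)) (t, v) =
      (let remaining := PySem.Set.diff (PySem.Set.ofList v) (PySem.Set.ofList fr)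
       if remaining ≠ [] then some (t, PySem.List.sorted remaining (fun x => x) false) else none) := by
  simp [pvG, PySem.Dict.contains, PySem.Dict.getD, PySem.Dict.get?]

theorem pvG_not_mem (l : List (Int × List Int)) (p : Int × List Int)
    (h : p.1 ∉ l.map Prod.fst) : pvG (PySem.Dict.mk l) p = some p := by
  have : (PySem.Dict.mk l).contains p.1 = false := by
    simp only [PySem.Dict.contains, List.any_eq_false]
    intro q hq hbeq
    have hq1 : q.1 = p.1 := by simpa using hbeq
    exact h (hq1 ▸ List.mem_map_of_mem (f := Prod.fst) hq)
  simp [pvG, this]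

-- A's loop, characterised: folding A's step over a key-nodup list l starting from a key-nodup
-- dict d filter-transforms d's items by pvG of l
theorem pvFoldA (l : List (Int × List Int)) (d : PySem.Dict Int (List Int))
    (hl : (l.map Prod.fst).Nodup) (hd : d.keys.Nodup) :
    (l.foldl (fun (result : PySem.Dict Int (List Int)) p =>
      if result.contains p.1 then
        let remaining := PySem.Set.diff (PySem.Set.ofList (result.getD p.1 [])) (PySem.Set.ofList p.2)
        if remaining ≠ [] then
          result.insert p.1 (PySem.List.sorted remaining (fun x => x) false)
        else
          result.erase p.1
      else result) d).items = d.items.filterMap (pvG (PySem.Dict.mk l)) := by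
  induction l generalizing d with
  | nil =>
    simp only [List.foldl_nil]
    rw [List.filterMap_congr (g := some) (fun p _ => pvG_not_mem [] p (by simp))]
    simp
  | cons hd' tl ih =>
    obtain ⟨t, fr⟩ := hd'
    simp only [List.map_cons, List.nodup_cons] at hl
    obtain ⟨htl, hnd⟩ := hl
    simp only [List.foldl_cons]
    by_cases hc : d.contains t = true
    · set r := PySem.Set.diff (PySem.Set.ofList (d.getD t [])) (PySem.Set.ofList fr) with hr
      by_cases hre : r ≠ []
      · -- insert branch
        rw [if_pos hc]
        rw [if_pos hre]
        rw [ih _ hnd (PySem.Dict.nodup_keys_insert d t _ hd)]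
        rw [PySem.Dict.items_insert_of_contains d _ hc, List.filterMap_map]
        apply List.filterMap_congr
        intro p hp
        by_cases hpt : p.1 = t
        · have hpv : p = (t, p.2) := by rw [← hpt]
          have hget : d.getD t [] = p.2 :=
            PySem.Dict.getD_of_mem_items d (hpv ▸ hp) hd []
          simp only [Function.comp_apply, hpt, beq_self_eq_true, if_pos]
          rw [pvG_not_mem tl _ (by simpa using htl)]
          rw [hpv, pvG_cons_self]
          simp only [← hget, ← hr, if_pos hre]
        · simp only [Function.comp_apply, (by simpa using hpt : ¬ (p.1 == t) = true), if_neg,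
            Bool.false_eq_true, not_false_iff]
          rw [pvG_cons_of_ne t fr tl p hpt]
      · -- erase branch
        rw [if_pos hc]
        rw [if_neg hre]
        rw [ne_eq, not_not] at hre
        have herase_items : (d.erase t).items = d.items.filter (fun p => !(p.1 == t)) := rfl
        have herase_nodup : (d.erase t).keys.Nodup := by
          have hs : (d.erase t).keys.Sublist d.keys := by
            simp only [PySem.Dict.keys, PySem.Dict.erase]
            exact List.Sublist.map _ List.filter_sublist
          exact hs.nodup hd
        rw [ih _ hnd herase_nodup, herase_items]
        rw [← List.filterMap_eq_filter, List.filterMap_filterMap]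
        apply List.filterMap_congr
        intro p hp
        by_cases hpt : p.1 = t
        · have hpv : p = (t, p.2) := by rw [← hpt]
          have hget : d.getD t [] = p.2 :=
            PySem.Dict.getD_of_mem_items d (hpv ▸ hp) hd []
          simp only [hpt, beq_self_eq_true, Option.guard]
          rw [hpv, pvG_cons_self]
          simp [← hget, ← hr, hre]
        · have hbe : (p.1 == t) = false := by simpa using hpt
          simp only [Option.guard, hbe]
          rw [pvG_cons_of_ne t fr tl p hpt]
          simp
    · -- key absent: step is the identity
      rw [if_neg hc]
      rw [ih _ hnd hd]
      apply List.filterMap_congr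
      intro p hp
      have hpt : p.1 ≠ t := by
        intro h
        apply hc
        simp only [PySem.Dict.contains, List.any_eq_true]
        exact ⟨p, hp, by simp [h]⟩
      exact (pvG_cons_of_ne t fr tl p hpt).symm

-- merge subtraction against the empty subtrahend is the identity
theorem pvMergeSub_nil (xs : List Int) : pvMergeSub xs [] = xs := by
  induction xs with
  | nil => simp [pvMergeSub]
  | cons x xs ih => simp [pvMergeSub, ih]

-- on strictly increasing lists the two-pointer merge subtraction is exactly the filter
theorem pvMergeSub_filter (xs ys : List Int) (hx : xs.Pairwise (· < ·)) (hy : ys.Pairwise (· < ·)) :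
    pvMergeSub xs ys = xs.filter (fun x => decide (x ∉ ys)) := by
  induction xs, ys using pvMergeSub.induct with
  | case1 ys => simp [pvMergeSub]
  | case2 x xs => simp [pvMergeSub_nil]
  | case3 x xs y ys hlt ih =>
    rw [List.pairwise_cons] at hy
    have hstep : pvMergeSub (x :: xs) (y :: ys) = pvMergeSub (x :: xs) ys := by
      simp [pvMergeSub, hlt]
    rw [hstep, ih hx hy.2]
    apply List.filter_congr
    intro e he
    have hxe : x ≤ e := by
      rcases List.mem_cons.mp he with h1 | h1
      · exact le_of_eq h1.symm
      · exact le_of_lt ((List.pairwise_cons.mp hx).1 e h1)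
    have hey : e ≠ y := by
      intro h; rw [h] at hxe; exact absurd hlt (not_lt.mpr hxe)
    simp [hey]
  | case4 x xs y ys hnlt heq ih =>
    have hyx : y = x := by simpa using heq
    rw [List.pairwise_cons] at hx
    have hstep : pvMergeSub (x :: xs) (y :: ys) = pvMergeSub xs (y :: ys) := by
      simp [pvMergeSub, hnlt, heq]
    rw [hstep, ih hx.2 hy]
    subst hyx
    simp
  | case5 x xs y ys hnlt hne ih =>
    have hxy : x < y := by
      rcases lt_trichotomy x y with h | h | h
      · exact h
      · exact absurd (by simpa using h.symm) (by simpa using hne)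
      · exact absurd h hnlt
    rw [List.pairwise_cons] at hx
    have hstep : pvMergeSub (x :: xs) (y :: ys) = x :: pvMergeSub xs (y :: ys) := by
      simp [pvMergeSub, hnlt, hne]
    rw [hstep, ih hx.2 hy]
    rw [List.pairwise_cons] at hy
    have h1 : x ≠ y := ne_of_lt hxy
    have h2 : x ∉ ys := fun h => absurd (lt_trans hxy (hy.1 x h)) (lt_irrefl x)
    simp [h1, h2]

-- merging the dedup-sorted lists equals sorting the set difference
theorem pvMergeSub_sorted (a b : List Int) :
    pvMergeSub (PySem.List.sorted (PySem.Set.ofList a) (fun x => x) false)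
               (PySem.List.sorted (PySem.Set.ofList b) (fun x => x) false)
    = PySem.List.sorted (PySem.Set.diff (PySem.Set.ofList a) (PySem.Set.ofList b)) (fun x => x) false := by
  have hA := PySem.List.sorted_ofList_pairwise_lt (xs := a)
  have hB := PySem.List.sorted_ofList_pairwise_lt (xs := b)
  rw [pvMergeSub_filter _ _ hA hB]
  have hcongr : List.filter (fun x => decide (x ∉ PySem.List.sorted (PySem.Set.ofList b) (fun x => x) false))
        (PySem.List.sorted (PySem.Set.ofList a) (fun x => x) false)
      = List.filter (fun x => !(PySem.Set.ofList b).contains x)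
        (PySem.List.sorted (PySem.Set.ofList a) (fun x => x) false) := by
    apply List.filter_congr
    intro e _
    by_cases h : e ∈ PySem.Set.ofList b
    · simp [PySem.List.mem_sorted, h, PySem.Set.contains]
    · simp [PySem.List.mem_sorted, h, PySem.Set.contains]
  rw [hcongr]
  symm
  apply PySem.List.sorted_eq_of_perm_of_pairwise_lt
  · have hperm := (PySem.List.sorted_perm (PySem.Set.ofList a) (fun x => x) false).filter
      (fun x => !(PySem.Set.ofList b).contains x)
    simpa [PySem.Set.diff, PySem.Set.contains] using hperm
  · exact List.Pairwise.sublist List.filter_sublist hA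

-- B's loop, characterised: appending pass over l with fresh keys
theorem pvFoldB (nfd : PySem.Dict Int (List Int)) (l : List (Int × List Int))
    (acc : PySem.Dict Int (List Int))
    (hl : (l.map Prod.fst).Nodup)
    (hfresh : ∀ k ∈ l.map Prod.fst, acc.contains k = false) :
    (l.foldl (fun (result : PySem.Dict Int (List Int)) p =>
      if nfd.contains p.1 then
        let xs := PySem.List.sorted (PySem.Set.ofList p.2) (fun x => x) false
        let ys := PySem.List.sorted (PySem.Set.ofList (nfd.getD p.1 [])) (fun x => x) false
        let out := pvMergeSub xs ys
        if out ≠ [] then result.insert p.1 out else result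
      else result.insert p.1 p.2) acc).items = acc.items ++ l.filterMap (pvG nfd) := by
  induction l generalizing acc with
  | nil => simp
  | cons hd' tl ih =>
    simp only [List.map_cons, List.nodup_cons] at hl
    obtain ⟨htl, hnd⟩ := hl
    have hfr : acc.contains hd'.1 = false := hfresh hd'.1 (by simp)
    have hfresh' : ∀ (v : List Int), ∀ k ∈ tl.map Prod.fst,
        (acc.insert hd'.1 v).contains k = false := by
      intro v k hk
      rw [PySem.Dict.contains_insert]
      have : k ≠ hd'.1 := fun h => htl (h ▸ hk)
      simp [this, hfresh k (by simp [hk])]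
    simp only [List.foldl_cons]
    by_cases hc : nfd.contains hd'.1 = true
    · set r := PySem.Set.diff (PySem.Set.ofList hd'.2) (PySem.Set.ofList (nfd.getD hd'.1 [])) with hr
      have hms : pvMergeSub (PySem.List.sorted (PySem.Set.ofList hd'.2) (fun x => x) false)
          (PySem.List.sorted (PySem.Set.ofList (nfd.getD hd'.1 [])) (fun x => x) false)
          = PySem.List.sorted r (fun x => x) false := by
        rw [hr]; exact pvMergeSub_sorted hd'.2 (nfd.getD hd'.1 [])
      by_cases hre : r ≠ []
      · have hout : PySem.List.sorted r (fun x => x) false ≠ [] := by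
          rw [ne_eq, PySem.List.sorted_eq_nil_iff]; exact hre
        simp only [if_pos hc, hms, if_pos hout]
        rw [ih _ hnd (hfresh' _)]
        rw [PySem.Dict.items_insert_of_not_contains acc _ hfr]
        have hG : pvG nfd hd' = some (hd'.1, PySem.List.sorted r (fun x => x) false) := by
          simp [pvG, hc, ← hr, hre]
        simp [hG]
      · have hout : ¬ (PySem.List.sorted r (fun x => x) false ≠ []) := by
          rw [ne_eq, not_not] at hre ⊢
          rw [PySem.List.sorted_eq_nil_iff]; exact hre
        simp only [if_pos hc, hms, if_neg hout]
        rw [ih _ hnd (fun k hk => hfresh k (by simp [hk]))]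
        have hG : pvG nfd hd' = none := by
          rw [ne_eq, not_not] at hre
          simp [pvG, hc, ← hr, hre]
        simp [hG]
    · simp only [if_neg hc]
      rw [ih _ hnd (hfresh' _)]
      rw [PySem.Dict.items_insert_of_not_contains acc _ hfr]
      have hG : pvG nfd hd' = some hd' := by simp [pvG, hc]
      simp [hG]

-- ===== VERDICT (by name: the statement is the Claim_ definition above) =====
theorem subtract_frames_py_spec : Claim_equal_subtract_frames_py := by
  intro current new_frames _
  unfold Spec_subtract_frames_py subtract_frames_py subtract_frames_py_alt
  have hnf : ((PySem.Dict.ofList new_frames).items.map Prod.fst).Nodup :=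
    PySem.Dict.nodup_keys_ofList new_frames
  have hcur : (PySem.Dict.ofList current).keys.Nodup := PySem.Dict.nodup_keys_ofList current
  rw [pvFoldA _ _ hnf hcur]
  rw [pvFoldB (PySem.Dict.ofList new_frames) _ PySem.Dict.empty hcur
    (by intro k _; rfl)]
  simp [PySem.Dict.empty]
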